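-- pv_equiv track=rewrite | github.com/NotSimpleCode/simulacion | pruebas/model/poker_test.py | only_one_pair
-- ===== SOURCE A (Python) =====
-- def only_one_pair(numstr):
--     """Comprueba si hay solo un par en el número dado."""
--     count = {}
--     for char in numstr:
--         if char in count:
--             count[char] += 1
--         else:
--             count[char] = 1
--
--     num_pairs = sum(1 for freq in count.values() if freq == 2)
--
--     return num_pairs == 1
-- ===== SOURCE B (Python) =====
-- def only_one_pair(numstr):
--     """Comprueba si hay solo un par en el numero dado."""
--     s = sorted(numstr)
--     pairs = 0
--     i = 0
--     n = len(s)
--     while i < n: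
--         j = i + 1
--         while j < n and s[j] == s[i]:
--             j += 1
--         if j - i == 2:
--             pairs += 1
--         i = j
--     return pairs == 1
-- ===== Notes on version B (the rewrite author's own statement) =====
-- stated objective: alternative
-- what changed: Replaces the hash-map frequency count plus a pass over the dict values by sorting the characters and scanning runs of adjacent equal characters, counting runs of length exactly 2.
import Mathlib
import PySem

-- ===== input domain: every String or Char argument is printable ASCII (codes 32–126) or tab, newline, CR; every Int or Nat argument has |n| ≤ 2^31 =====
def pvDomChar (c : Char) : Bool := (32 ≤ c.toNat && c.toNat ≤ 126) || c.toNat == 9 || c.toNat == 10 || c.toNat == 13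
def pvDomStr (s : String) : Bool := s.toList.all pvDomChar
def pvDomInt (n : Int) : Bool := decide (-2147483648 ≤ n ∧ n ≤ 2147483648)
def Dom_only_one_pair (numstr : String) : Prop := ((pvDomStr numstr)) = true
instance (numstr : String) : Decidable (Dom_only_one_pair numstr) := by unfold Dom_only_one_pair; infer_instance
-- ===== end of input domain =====

-- B sorts the characters and counts runs of adjacent equal characters of length exactly 2,
-- instead of A's hash-map frequency count; same results, alternative algorithm.

-- ===== PORT A =====
def only_one_pair (numstr : String) : Bool :=
  let count : PySem.Dict Char Int := numstr.toList.foldl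
    (fun d ch => if d.contains ch then d.modify ch 0 (· + 1) else d.insert ch 1)
    PySem.Dict.empty
  let num_pairs : Int := ((count.values.filter (fun freq => freq == 2)).length : Int)
  num_pairs == 1

-- ===== PORT B =====
-- the outer while loop of Source B: each step consumes one maximal run of equal chars
-- (takeWhile/dropWhile is the inner 'while j < n and s[j] == s[i]' scan)
def pairRuns : List Char → Nat
  | [] => 0
  | c :: cs =>
      (if (cs.takeWhile (· == c)).length + 1 = 2 then 1 else 0)
      + pairRuns (cs.dropWhile (· == c))
termination_by l => l.length
decreasing_by
  simp only [List.length_cons]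
  exact Nat.lt_succ_of_le (List.length_dropWhile_le _ _)

def only_one_pair_alt (numstr : String) : Bool :=
  pairRuns (PySem.List.sorted numstr.toList (fun c => c) false) == 1

-- ===== PRECONDITION & SPEC =====
def Spec_only_one_pair (numstr : String) (out : Bool) : Prop := out = only_one_pair_alt numstr
instance (numstr : String) (out : Bool) : Decidable (Spec_only_one_pair numstr out) := by unfold Spec_only_one_pair; infer_instance

-- ===== CLAIM (what is proved, stated in full; the proofs are below) =====
def Claim_equal_only_one_pair : Prop := ∀ (numstr : String), Dom_only_one_pair numstr → Spec_only_one_pair numstr (only_one_pair numstr)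

-- ===== LEMMAS AND PROOFS =====

-- number of distinct characters occurring exactly twice
def pairCount (l : List Char) : Nat :=
  (PySem.List.dedup l).countP (fun c => decide (l.count c = 2))

-- A's branched update step equals the Counter step
lemma branch_step_eq (d : PySem.Dict Char Int) (ch : Char) :
    (if d.contains ch then d.modify ch 0 (· + 1) else d.insert ch 1)
      = d.modify ch 0 (· + 1) := by
  by_cases h : d.contains ch = true
  · simp [h]
  · have hc : d.contains ch = false := by simpa using h
    have hg : d.get? ch = none := by
      rw [PySem.Dict.get?_eq_none_iff_contains, hc]
    simp [PySem.Dict.modify, PySem.Dict.getD, hc, hg]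

lemma branch_fold_eq_counter (l : List Char) :
    l.foldl (fun d ch => if d.contains ch then d.modify ch 0 (· + 1) else d.insert ch 1)
      PySem.Dict.empty = PySem.Dict.counter l := by
  rw [PySem.Dict.counter_eq_foldl]
  simp only [branch_step_eq]

lemma A_eq (l : List Char) :
    (((PySem.Dict.counter l).values.filter (fun freq => freq == (2:Int))).length : Int)
      = (pairCount l : Int) := by
  have hv : (PySem.Dict.counter l).values
      = ((PySem.List.dedup l).map (fun k => (l.count k : Int))) := by
    show ((PySem.Dict.counter l).items.map (·.2)) = _
    rw [PySem.Dict.items_counter]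
    simp [PySem.List.dedup_eq_ofList]
  rw [hv, List.filter_map, List.length_map, ← List.countP_eq_length_filter, pairCount]
  congr 1
  apply List.countP_congr
  intro x _
  simp only [Function.comp]
  constructor <;> intro h <;> simp_all <;> omega

-- every element of a sorted list's tail beyond the initial run is > the head
lemma lt_of_mem_dropWhile (c : Char) (cs : List Char)
    (hp : (c :: cs).Pairwise (· ≤ ·)) :
    ∀ x ∈ cs.dropWhile (· == c), c < x := by
  have hle : ∀ x ∈ cs, c ≤ x := (List.pairwise_cons.mp hp).1
  have hpw : cs.Pairwise (· ≤ ·) := (List.pairwise_cons.mp hp).2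
  cases hr : cs.dropWhile (· == c) with
  | nil => intro x hx; simp at hx
  | cons h r' =>
    have hne : cs.dropWhile (· == c) ≠ [] := by simp [hr]
    have hhne : (((cs.dropWhile (· == c)).head hne == c) = false) :=
      List.head_dropWhile_not (· == c) hne
    have hhd : (cs.dropWhile (· == c)).head hne = h := by simp [hr]
    rw [hhd] at hhne
    have hne' : h ≠ c := by
      intro e; rw [e] at hhne; simp at hhne
    have hmem : h ∈ cs.dropWhile (· == c) := by rw [hr]; exact List.mem_cons_self
    have hhcs : h ∈ cs := (List.dropWhile_sublist _).subset hmem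
    have hch : c < h := lt_of_le_of_ne (hle h hhcs) (fun e => hne' e.symm)
    have hpw' : (h :: r').Pairwise (· ≤ ·) := by
      rw [← hr]; exact hpw.sublist (List.dropWhile_sublist _)
    intro x hx
    rcases List.mem_cons.mp hx with rfl | hx'
    · exact hch
    · exact lt_of_lt_of_le hch ((List.pairwise_cons.mp hpw').1 x hx')

theorem pairRuns_sorted : ∀ (s : List Char), s.Pairwise (· ≤ ·) → pairRuns s = pairCount s
  | [] => fun _ => by
      simp [pairRuns, pairCount, PySem.List.dedup, PySem.Set.ofList]
  | c :: cs => fun hp => by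
    set t := cs.takeWhile (· == c) with ht
    set r := cs.dropWhile (· == c) with hr
    have hcs : t ++ r = cs := List.takeWhile_append_dropWhile
    have htc : ∀ x ∈ t, x = c := by
      intro x hx
      rw [ht] at hx
      have hb := List.mem_takeWhile_imp hx
      exact eq_of_beq (by simpa using hb)
    have hrlt : ∀ x ∈ r, c < x := lt_of_mem_dropWhile c cs hp
    have hcnr : c ∉ r := fun h => lt_irrefl c (hrlt c h)
    have hrpw : r.Pairwise (· ≤ ·) :=
      ((List.pairwise_cons.mp hp).2).sublist (List.dropWhile_sublist _)
    have ih : pairRuns r = pairCount r := pairRuns_sorted r hrpw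
    -- count facts
    have hcount_c : (c :: cs).count c = t.length + 1 := by
      rw [List.count_cons_self, ← hcs, List.count_append]
      have h1 : t.count c = t.length := List.count_eq_length.mpr (fun b hb => (htc b hb).symm)
      have h2 : r.count c = 0 := List.count_eq_zero.mpr hcnr
      omega
    have hcount_ne : ∀ x, x ≠ c → (c :: cs).count x = r.count x := by
      intro x hx
      have h0 : t.count x = 0 := List.count_eq_zero.mpr (fun h => hx (htc x h))
      rw [← hcs]
      simp [List.count_append, h0, Ne.symm hx]
    -- dedup decomposition (as a permutation)
    have hperm : (PySem.List.dedup (c :: cs)).Perm (c :: PySem.List.dedup r) := by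
      rw [List.perm_ext_iff_of_nodup (PySem.List.nodup_dedup _)
        (List.nodup_cons.mpr ⟨fun h => hcnr ((PySem.List.mem_dedup _ _).mp h), PySem.List.nodup_dedup _⟩)]
      intro x
      simp only [PySem.List.mem_dedup, List.mem_cons, ← hcs, List.mem_append]
      constructor
      · rintro (rfl | hx | hx)
        · exact Or.inl rfl
        · exact Or.inl (htc x hx)
        · exact Or.inr hx
      · rintro (rfl | hx)
        · exact Or.inl rfl
        · exact Or.inr (Or.inr hx)
    have hcp : pairCount (c :: cs)
        = (if (c :: cs).count c = 2 then 1 else 0) + pairCount r := by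
      rw [pairCount, hperm.countP_eq, List.countP_cons]
      have hcg : (PySem.List.dedup r).countP (fun x => decide ((c :: cs).count x = 2))
          = (PySem.List.dedup r).countP (fun x => decide (r.count x = 2)) := by
        apply List.countP_congr
        intro x hx
        have hxr : x ∈ r := (PySem.List.mem_dedup _ _).mp hx
        rw [hcount_ne x (fun h => hcnr (h ▸ hxr))]
      rw [hcg, ← pairCount]
      by_cases h : (c :: cs).count c = 2 <;> simp [h] <;> omega
    simp only [pairRuns]
    rw [← ht, ← hr, ih, hcp, hcount_c]
termination_by s => s.length
decreasing_by
  simp only [hr, List.length_cons]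
  exact Nat.lt_succ_of_le (List.length_dropWhile_le _ _)

lemma pairCount_perm {l₁ l₂ : List Char} (h : l₁.Perm l₂) : pairCount l₁ = pairCount l₂ := by
  rw [pairCount, pairCount]
  have hperm : (PySem.List.dedup l₁).Perm (PySem.List.dedup l₂) := by
    rw [List.perm_ext_iff_of_nodup (PySem.List.nodup_dedup _) (PySem.List.nodup_dedup _)]
    intro x
    simp only [PySem.List.mem_dedup]
    exact ⟨fun hx => h.mem_iff.mp hx, fun hx => h.mem_iff.mpr hx⟩
  rw [hperm.countP_eq]
  apply List.countP_congr
  intro x _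
  rw [h.count_eq]

-- ===== VERDICT (by name: the statement is the Claim_ definition above) =====
theorem only_one_pair_spec : Claim_equal_only_one_pair := by
  intro numstr _
  show only_one_pair numstr = only_one_pair_alt numstr
  show ((((numstr.toList.foldl
      (fun d ch => if d.contains ch then d.modify ch 0 (· + 1) else d.insert ch 1)
      PySem.Dict.empty).values.filter (fun freq => freq == (2:Int))).length : Int) == 1)
    = (pairRuns (PySem.List.sorted numstr.toList (fun c => c) false) == 1)
  rw [branch_fold_eq_counter, A_eq,
      pairRuns_sorted _ (by simpa using PySem.List.sorted_pairwise numstr.toList (fun c => c)),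
      pairCount_perm (PySem.List.sorted_perm numstr.toList (fun c => c) false)]
  simp
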